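-- pv_equiv track=rewrite | github.com/jr6321/810_examples | primes.py | prime_comparisons
-- ===== SOURCE A (Python) =====
-- def prime_comparisons(n):
--     """ generate prime numbers by comparing up to cur // 2 + 1 """
--     comparisons = 0
--     primes = [2]
--     cur = 3  # cur is the next number to be checked
--
--     for i in range(n):
--         for p in primes:
--             comparisons += 1
--             if cur % p == 0:
--                 break
--         else:
--             # exhausted all of the primes and found another prime number
--             primes.append(cur)
--
--         cur += 1
--
--     return comparisons
-- ===== SOURCE B (Python) =====
-- def prime_comparisons(n):
--     """Same count, but per number scan for the smallest divisor (up to sqrt)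
--     and add that prime's rank, instead of trial-dividing by the growing prime list."""
--     total = 0
--     pc = 0          # number of primes seen so far
--     rank = {}       # prime -> its position in the prime sequence
--     for m in range(2, n + 3):
--         d = 2
--         while d * d <= m and m % d != 0:
--             d += 1
--         spf = d if d * d <= m else m
--         if spf == m:
--             pc += 1
--             rank[m] = pc
--             if m >= 3:
--                 total += pc - 1
--         elif m >= 3:
--             total += rank[spf]
--     return total
-- ===== Notes on version B (the rewrite author's own statement) =====
-- stated objective: faster
-- what changed: Instead of trial-dividing each number by the growing list of primes (re-scanning the list from the start every time), B finds each number's smallest divisor by a sqrt-bounded scan and adds that prime's rank among the primes (a dict built once), which is exactly the number of comparisons A spends on that number.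
import Mathlib
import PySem

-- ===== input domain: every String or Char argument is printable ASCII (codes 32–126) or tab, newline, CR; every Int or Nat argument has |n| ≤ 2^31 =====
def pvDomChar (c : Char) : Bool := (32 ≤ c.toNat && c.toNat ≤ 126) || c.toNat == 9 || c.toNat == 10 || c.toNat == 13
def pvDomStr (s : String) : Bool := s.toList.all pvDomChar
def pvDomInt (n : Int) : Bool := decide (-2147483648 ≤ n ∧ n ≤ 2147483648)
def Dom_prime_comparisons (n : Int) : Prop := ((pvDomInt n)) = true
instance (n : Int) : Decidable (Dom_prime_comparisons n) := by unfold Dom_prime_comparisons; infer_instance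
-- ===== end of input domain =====

-- B replaces A's trial division by the growing prime list with a sqrt-bounded
-- smallest-divisor scan plus a rank dictionary (objective: faster).


-- ===== PORT A =====
-- inner `for p in primes: comparisons += 1; if cur % p == 0: break / else:` —
-- returns (comparisons added, whether it broke)
def pcInner (cur : Nat) : List Nat → Nat × Bool
  | [] => (0, false)
  | p :: ps =>
    if cur % p = 0 then (1, true)
    else
      let r := pcInner cur ps
      (r.1 + 1, r.2)

-- outer `for i in range(n)` with state (comparisons, primes, cur)
def pcLoop : Nat → Nat → List Nat → Nat → Nat
  | 0, comparisons, _, _ => comparisons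
  | k+1, comparisons, primes, cur =>
    let r := pcInner cur primes
    pcLoop k (comparisons + r.1) (if r.2 then primes else primes ++ [cur]) (cur + 1)

def prime_comparisons (n : Int) : Int := (pcLoop n.toNat 0 [2] 3 : Nat)

-- ===== PORT B =====
-- `d = 2; while d*d <= m and m % d != 0: d += 1`
def pcScan (m d : Nat) : Nat :=
  if d * d ≤ m ∧ m % d ≠ 0 then pcScan m (d + 1) else d
termination_by m + 1 - d
decreasing_by
  have hd : d ≤ m := by
    rcases Nat.eq_zero_or_pos d with h0 | h0
    · omega
    · calc d ≤ d * d := Nat.le_mul_of_pos_left d h0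
        _ ≤ m := by omega
  omega

def pcSpf (m : Nat) : Nat :=
  let d := pcScan m 2
  if d * d ≤ m then d else m

-- dict lookup `rank[spf]` (keys distinct; 0 never stored, used as "absent")
def pcRank : List (Nat × Nat) → Nat → Nat
  | [], _ => 0
  | e :: t, q => if e.1 = q then e.2 else pcRank t q

-- `for m in range(2, n + 3)` with state (total, pc, rank)
def pcLoopB : Nat → Nat → Nat → Nat → List (Nat × Nat) → Nat
  | 0, _, total, _, _ => total
  | k+1, m, total, pc, rank =>
    let s := pcSpf m
    if s = m then
      let pc' := pc + 1
      pcLoopB k (m + 1) (if 3 ≤ m then total + (pc' - 1) else total) pc' (rank ++ [(m, pc')])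
    else
      pcLoopB k (m + 1) (if 3 ≤ m then total + pcRank rank s else total) pc rank

def prime_comparisons_alt (n : Int) : Int := (pcLoopB (n + 1).toNat 2 0 0 [] : Nat)

-- ===== PRECONDITION & SPEC =====
def Spec_prime_comparisons (n : Int) (out : Int) : Prop := out = prime_comparisons_alt n
instance (n : Int) (out : Int) : Decidable (Spec_prime_comparisons n out) := by unfold Spec_prime_comparisons; infer_instance

-- ===== CLAIM (what is proved, stated in full; the proofs are below) =====
def Claim_equal_prime_comparisons : Prop := ∀ (n : Int), Dom_prime_comparisons n → Spec_prime_comparisons n (prime_comparisons n)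

-- ===== LEMMAS AND PROOFS =====

-- number of primes ≤ m
def picount (m : Nat) : Nat := ((List.range (m + 1)).filter (fun x => decide (Nat.Prime x))).length

-- the primes in [0, m], in increasing order
def primesUpto (m : Nat) : List Nat := (List.range (m + 1)).filter (fun x => decide (Nat.Prime x))

-- comparisons A spends on the number m
def pcG (m : Nat) : Nat := if m.minFac = m then picount (m - 1) else picount m.minFac

-- total comparisons over k numbers starting at m
def pcSum : Nat → Nat → Nat
  | 0, _ => 0
  | k+1, m => pcG m + pcSum k (m + 1)

theorem picount_succ (m : Nat) :
    picount (m + 1) = picount m + (if Nat.Prime (m + 1) then 1 else 0) := by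
  simp only [picount, List.range_succ, List.filter_append]
  split <;> simp_all <;> omega

theorem picount_pos {q : Nat} (hq : q.Prime) : 0 < picount q := by
  have : q ∈ (List.range (q + 1)).filter (fun x => decide (Nat.Prime x)) := by
    simp [List.mem_filter, List.mem_range, hq]
  have := List.length_pos_of_mem this
  simpa [picount] using this

theorem mem_primesUpto {x m : Nat} : x ∈ primesUpto m ↔ x.Prime ∧ x ≤ m := by
  simp [primesUpto, List.mem_filter, List.mem_range, Nat.lt_succ_iff, and_comm]

theorem sorted_primesUpto (m : Nat) : List.Pairwise (· < ·) (primesUpto m) :=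
  List.Pairwise.sublist List.filter_sublist List.pairwise_lt_range

theorem filter_range_lt : ∀ (m q : Nat), q ≤ m →
    (List.range m).filter (fun x => decide (x < q)) = List.range q := by
  intro m
  induction m with
  | zero => intro q hq; interval_cases q; simp
  | succ m ih =>
    intro q hq
    rcases Nat.eq_or_lt_of_le hq with h | h
    · subst h
      apply List.filter_eq_self.mpr
      intro a ha
      simp [List.mem_range.mp ha]
    · have hq' : q ≤ m := by omega
      rw [List.range_succ, List.filter_append, ih q hq']
      simp [show ¬ m < q by omega]

-- rank of a prime q: A's break position when q is the first divisor found
theorem primes_filter_len {q m : Nat} (hq : q.Prime) (hqm : q < m) :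
    ((primesUpto (m - 1)).filter (fun x => decide (x < q))).length + 1 = picount q := by
  have hm : m - 1 + 1 = m := by
    have := hq.two_le; omega
  have hcomm : (primesUpto (m - 1)).filter (fun x => decide (x < q))
      = ((List.range m).filter (fun x => decide (x < q))).filter (fun x => decide (Nat.Prime x)) := by
    rw [primesUpto, hm, List.filter_comm]
  rw [hcomm, filter_range_lt m q (by omega)]
  have hq1 : q - 1 + 1 = q := by have := hq.two_le; omega
  have : picount q = picount (q - 1) + 1 := by
    conv_lhs => rw [← hq1]
    rw [picount_succ, hq1]
    simp [hq]
  rw [this, picount, hq1]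

-- characterisation of A's inner loop on a complete sorted list of primes < m
theorem pcInner_eq : ∀ (L : List Nat) (m : Nat), 2 ≤ m →
    (∀ p ∈ L, Nat.Prime p ∧ p < m) → List.Pairwise (· < ·) L →
    (∀ q, Nat.Prime q → q ∣ m → q < m → q ∈ L) →
    pcInner m L = if m.minFac = m then (L.length, false)
                  else ((L.filter (fun x => decide (x < m.minFac))).length + 1, true) := by
  intro L
  induction L with
  | nil =>
    intro m hm _ _ hcomp
    by_cases h : m.minFac = m
    · simp [pcInner, h]
    · exfalso
      have hp := Nat.minFac_prime (show m ≠ 1 by omega)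
      have hlt : m.minFac < m := lt_of_le_of_ne (Nat.minFac_le (by omega)) h
      exact absurd (hcomp _ hp (Nat.minFac_dvd m) hlt) (List.not_mem_nil)
  | cons p ps ih =>
    intro m hm hall hsort hcomp
    have hp := hall p (List.mem_cons_self)
    have hmf := Nat.minFac_prime (show m ≠ 1 by omega)
    by_cases hdvd : m % p = 0
    · have hpd : p ∣ m := Nat.dvd_of_mod_eq_zero hdvd
      have hle : m.minFac ≤ p := Nat.minFac_le_of_dvd hp.1.two_le hpd
      have hne : m.minFac ≠ m := by omega
      have hmem : m.minFac ∈ p :: ps :=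
        hcomp _ hmf (Nat.minFac_dvd m) (by omega)
      have hpeq : p = m.minFac := by
        rcases List.mem_cons.mp hmem with h | h
        · omega
        · have := (List.pairwise_cons.mp hsort).1 _ h
          omega
      have hfilter : (ps.filter (fun x => decide (x < m.minFac))) = [] := by
        apply List.filter_eq_nil_iff.mpr
        intro a ha
        have := (List.pairwise_cons.mp hsort).1 a ha
        simp; omega
      have hdvd' : m % m.minFac = 0 := hpeq ▸ hdvd
      simp [pcInner, hdvd, hne, List.filter_cons, hpeq, hfilter, hdvd']
    · have hpnd : ¬ p ∣ m := fun h => hdvd (Nat.mod_eq_zero_of_dvd h)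
      have hcomp' : ∀ q, Nat.Prime q → q ∣ m → q < m → q ∈ ps := by
        intro q hq hqd hqm
        rcases List.mem_cons.mp (hcomp q hq hqd hqm) with h | h
        · exact absurd (h ▸ hqd) hpnd
        · exact h
      have ihv := ih m hm (fun x hx => hall x (List.mem_cons_of_mem _ hx))
        (List.pairwise_cons.mp hsort).2 hcomp'
      by_cases h : m.minFac = m
      · simp [pcInner, hdvd, h, ihv]
      · have hmem : m.minFac ∈ ps :=
          hcomp' _ hmf (Nat.minFac_dvd m)
            (lt_of_le_of_ne (Nat.minFac_le (by omega)) h)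
        have hplt : p < m.minFac := (List.pairwise_cons.mp hsort).1 _ hmem
        simp only [pcInner, hdvd, if_neg hdvd, ihv, if_neg h, List.filter_cons,
          decide_eq_true_eq, if_pos hplt]
        simp [hplt]
  termination_by L => L.length

theorem primesUpto_step (m : Nat) (hm : 1 ≤ m) :
    primesUpto m = primesUpto (m - 1) ++ (if Nat.Prime m then [m] else []) := by
  have h1 : m - 1 + 1 = m := by omega
  rw [primesUpto, primesUpto, h1, List.range_succ, List.filter_append]
  split <;> simp_all

-- A's loop invariant
theorem pcLoop_eq : ∀ (k c cur : Nat), 3 ≤ cur →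
    pcLoop k c (primesUpto (cur - 1)) cur = c + pcSum k cur := by
  intro k
  induction k with
  | zero => intro c cur _; simp [pcLoop, pcSum]
  | succ k ih =>
    intro c cur hcur
    have hall : ∀ p ∈ primesUpto (cur - 1), Nat.Prime p ∧ p < cur := by
      intro p hp
      have := mem_primesUpto.mp hp
      exact ⟨this.1, by omega⟩
    have hcomp : ∀ q, Nat.Prime q → q ∣ cur → q < cur → q ∈ primesUpto (cur - 1) := by
      intro q hq _ hlt
      exact mem_primesUpto.mpr ⟨hq, by omega⟩
    have hinner := pcInner_eq (primesUpto (cur - 1)) cur (by omega) hall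
      (sorted_primesUpto _) hcomp
    have hstep := primesUpto_step cur (by omega)
    have h1 : cur + 1 - 1 = cur := by omega
    by_cases h : cur.minFac = cur
    · have hprime : cur.Prime := by
        rw [Nat.prime_def_minFac]; exact ⟨by omega, h⟩
      have hlen : (primesUpto (cur - 1)).length = picount (cur - 1) := by
        simp [primesUpto, picount]
      rw [pcLoop, hinner, if_pos h]
      have hupd : primesUpto (cur - 1) ++ [cur] = primesUpto (cur + 1 - 1) := by
        rw [h1, hstep, if_pos hprime]
      simp only [Bool.false_eq_true, if_false, hupd]
      rw [ih (c + (primesUpto (cur - 1)).length) (cur + 1) (by omega)]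
      simp [pcSum, pcG, h, hlen]; omega
    · have hnprime : ¬ cur.Prime := fun hpr => h hpr.minFac_eq
      have hmf := Nat.minFac_prime (show cur ≠ 1 by omega)
      have hlt : cur.minFac < cur := lt_of_le_of_ne (Nat.minFac_le (by omega)) h
      rw [pcLoop, hinner, if_neg h]
      have hupd : primesUpto (cur - 1) = primesUpto (cur + 1 - 1) := by
        rw [h1, hstep, if_neg hnprime, List.append_nil]
      simp only [if_true, hupd]
      rw [ih _ (cur + 1) (by omega)]
      have hfl : ((primesUpto cur).filter (fun x => decide (x < cur.minFac))).length + 1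
          = picount cur.minFac := by
        rw [show primesUpto cur = primesUpto (cur - 1) by
          rw [hstep, if_neg hnprime, List.append_nil]]
        exact primes_filter_len hmf hlt
      simp [pcSum, pcG, h]; omega

-- B's scan: characterisation by functional induction
theorem pcScan_ge (m d : Nat) : d ≤ pcScan m d := by
  fun_induction pcScan with
  | case1 d h ih => omega
  | case2 d h => omega

theorem pcScan_stop (m d : Nat) :
    ¬ (pcScan m d * pcScan m d ≤ m ∧ m % pcScan m d ≠ 0) := by
  fun_induction pcScan with
  | case1 d h ih => exact ih
  | case2 d h => simpa using h

theorem pcScan_min (m d : Nat) :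
    ∀ e, d ≤ e → e < pcScan m d → e * e ≤ m ∧ m % e ≠ 0 := by
  fun_induction pcScan with
  | case1 d h ih =>
    intro e he hlt
    rcases Nat.eq_or_lt_of_le he with h1 | h1
    · exact h1 ▸ h
    · exact ih e (by omega) hlt
  | case2 d h =>
    intro e he hlt; omega

theorem pcSpf_eq_minFac (m : Nat) (hm : 2 ≤ m) : pcSpf m = m.minFac := by
  have hmf := Nat.minFac_prime (show m ≠ 1 by omega)
  have hstop := pcScan_stop m 2
  have hmin := pcScan_min m 2
  set d := pcScan m 2 with hd
  by_cases hdm : d * d ≤ m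
  · have hmod : m % d = 0 := by
      by_contra h; exact hstop ⟨hdm, h⟩
    have hd2 : 2 ≤ d := pcScan_ge m 2
    have hdvd : d ∣ m := Nat.dvd_of_mod_eq_zero hmod
    have hle : m.minFac ≤ d := Nat.minFac_le_of_dvd hd2 hdvd
    have heq : m.minFac = d := by
      by_contra hne
      have hlt : m.minFac < d := by omega
      have := hmin m.minFac hmf.two_le hlt
      exact this.2 (Nat.mod_eq_zero_of_dvd (Nat.minFac_dvd m))
    simp [pcSpf, ← hd, if_pos hdm, heq]
  · have hprime : m.Prime := by
      rw [Nat.prime_def_le_sqrt]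
      refine ⟨hm, fun e he hes hdvd => ?_⟩
      have hee : e * e ≤ m := Nat.le_sqrt.mp hes
      have helt : e < d := by nlinarith
      exact (hmin e he helt).2 (Nat.mod_eq_zero_of_dvd hdvd)
    simp [pcSpf, ← hd, if_neg hdm, hprime.minFac_eq]

theorem pcRank_append_of_ne {l1 : List (Nat × Nat)} {q : Nat} (l2 : List (Nat × Nat))
    (h : pcRank l1 q ≠ 0) : pcRank (l1 ++ l2) q = pcRank l1 q := by
  induction l1 with
  | nil => simp [pcRank] at h
  | cons e t ih =>
    by_cases he : e.1 = q
    · simp [pcRank, he]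
    · simp only [pcRank, he, if_neg he, List.cons_append] at h ⊢
      exact ih h

theorem pcRank_append_not_key {l1 : List (Nat × Nat)} {q : Nat} (l2 : List (Nat × Nat))
    (h : ∀ e ∈ l1, e.1 ≠ q) : pcRank (l1 ++ l2) q = pcRank l2 q := by
  induction l1 with
  | nil => simp
  | cons e t ih =>
    have he := h e (List.mem_cons_self)
    simp only [List.cons_append, pcRank, if_neg he]
    exact ih (fun x hx => h x (List.mem_cons_of_mem _ hx))

-- B's loop invariant
theorem pcLoopB_eq : ∀ (k m total pc : Nat) (rank : List (Nat × Nat)), 3 ≤ m →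
    pc = picount (m - 1) →
    (∀ q, Nat.Prime q → q < m → pcRank rank q = picount q) →
    (∀ e ∈ rank, e.1 < m) →
    pcLoopB k m total pc rank = total + pcSum k m := by
  intro k
  induction k with
  | zero => intro m total pc rank _ _ _ _; simp [pcLoopB, pcSum]
  | succ k ih =>
    intro m total pc rank hm hpc hrank hkeys
    have hspf := pcSpf_eq_minFac m (by omega)
    have hm1 : m - 1 + 1 = m := by omega
    have hm2 : m + 1 - 1 = m := by omega
    by_cases h : m.minFac = m
    · have hprime : m.Prime := by
        rw [Nat.prime_def_minFac]; exact ⟨by omega, h⟩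
      have hpc' : pc + 1 = picount m := by
        have := picount_succ (m - 1)
        rw [hm1] at this
        simp [this, hprime, hpc]
      have hrank' : ∀ q, Nat.Prime q → q < m + 1 →
          pcRank (rank ++ [(m, pc + 1)]) q = picount q := by
        intro q hq hqm
        by_cases hqm' : q = m
        · subst hqm'
          rw [pcRank_append_not_key _ (fun e he => by have := hkeys e he; simp; omega)]
          simp [pcRank, hpc']
        · have hlt : q < m := by omega
          have hold := hrank q hq hlt
          have hne : pcRank rank q ≠ 0 := by
            rw [hold]; have := picount_pos hq; omega
          rw [pcRank_append_of_ne _ hne, hold]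
      rw [pcLoopB]
      simp only [hspf, if_pos h, if_pos hm]
      rw [ih (m + 1) _ (pc + 1) _ (by omega) (by rw [hm2]; exact hpc')
        hrank' (by intro e he; rcases List.mem_append.mp he with h' | h'
                   · have := hkeys e h'; omega
                   · obtain rfl := List.mem_singleton.mp h'
                     simpa using Nat.lt_succ_self m)]
      simp [pcSum, pcG, h, hpc]; omega
    · have hnprime : ¬ m.Prime := fun hpr => h hpr.minFac_eq
      have hmf := Nat.minFac_prime (show m ≠ 1 by omega)
      have hlt : m.minFac < m := lt_of_le_of_ne (Nat.minFac_le (by omega)) h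
      have hpcm : pc = picount m := by
        have := picount_succ (m - 1)
        rw [hm1] at this
        simp [this, hnprime, hpc]
      rw [pcLoopB]
      simp only [hspf, if_neg h, if_pos hm]
      rw [ih (m + 1) _ pc rank (by omega) (by rw [hm2]; exact hpcm)
        (fun q hq hqm => hrank q hq (by rcases Nat.lt_succ_iff_lt_or_eq.mp hqm with h' | h'
                                        · exact h'
                                        · exact absurd (h' ▸ hq) hnprime))
        (fun e he => by have := hkeys e he; omega)]
      rw [hrank _ hmf hlt]
      simp [pcSum, pcG, h]; omega

theorem primesUpto_two : primesUpto 2 = [2] := by decide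

theorem pcSpf_two : pcSpf 2 = 2 := by
  have h : pcScan 2 2 = 2 := by rw [pcScan]; norm_num
  simp [pcSpf, h]

-- ===== VERDICT (by name: the statement is the Claim_ definition above) =====
theorem prime_comparisons_spec : Claim_equal_prime_comparisons := by
  intro n _
  unfold Spec_prime_comparisons prime_comparisons prime_comparisons_alt
  have hA : pcLoop n.toNat 0 [2] 3 = pcSum n.toNat 3 := by
    have := pcLoop_eq n.toNat 0 3 (by omega)
    simpa [primesUpto_two] using this
  rcases le_or_gt 0 n with hn | hn
  · have hk : (n + 1).toNat = n.toNat + 1 := by omega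
    have hB : pcLoopB (n.toNat + 1) 2 0 0 [] = pcSum n.toNat 3 := by
      have hstep1 : pcLoopB (n.toNat + 1) 2 0 0 [] = pcLoopB n.toNat 3 0 1 [(2, 1)] := by
        rw [pcLoopB]
        norm_num [pcSpf_two]
      rw [hstep1, pcLoopB_eq n.toNat 3 0 1 [(2, 1)] (by omega) (by decide)
        (by intro q hq hqm
            have h2 : q = 2 := by have := hq.two_le; omega
            subst h2; decide)
        (by simp)]
      simp
    rw [hA, hk, hB]
  · have h1 : n.toNat = 0 := by omega
    have h2 : (n + 1).toNat = 0 := by omega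
    rw [hA, h1, h2]
    simp [pcLoopB, pcSum]
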